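-- pv_equiv track=rewrite | github.com/ShapeLayer/training | tasks/online_judge/baekjoon/python/3059.py | compute
-- ===== SOURCE A (Python) =====
-- def compute(gets: str) -> int:
--     exists = { chr(i) : False for i in range(65, 91) }
--     for get in gets:
--         exists[get] = True
--     result = 0
--     for exist in exists:
--         if not exists[exist]:
--             result += ord(exist)
--     return result
-- ===== SOURCE B (Python) =====
-- def compute(gets: str) -> int:
--     return 2015 - sum({ord(c) for c in gets if 'A' <= c <= 'Z'})
-- ===== Notes on version B (the rewrite author's own statement) =====
-- stated objective: simpler
-- what changed: Replaces the 26-slot absence dict plus two loops by the closed-form total 2015 minus the sum of the set of distinct uppercase codes present in the input.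
import Mathlib
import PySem

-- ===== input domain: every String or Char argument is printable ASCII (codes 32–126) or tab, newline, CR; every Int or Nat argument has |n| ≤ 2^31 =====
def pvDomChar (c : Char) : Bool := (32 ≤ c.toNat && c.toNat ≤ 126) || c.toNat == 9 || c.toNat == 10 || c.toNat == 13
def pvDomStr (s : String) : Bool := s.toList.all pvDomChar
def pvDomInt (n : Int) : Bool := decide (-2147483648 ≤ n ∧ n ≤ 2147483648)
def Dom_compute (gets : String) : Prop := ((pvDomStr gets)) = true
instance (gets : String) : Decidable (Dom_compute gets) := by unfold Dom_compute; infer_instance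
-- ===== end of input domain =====

-- B replaces the absence-dict scan of all 26 letters by the closed form
-- 2015 (= sum of ord 'A'..'Z') minus the sum of the distinct present uppercase codes (objective: simpler).

-- ===== PORT A =====
def compute (gets : String) : Int :=
  let ex0 : PySem.Dict Char Bool :=
    (PySem.List.pyRange 65 91 1).foldl (fun d i => d.insert (Char.ofNat i.toNat) false) PySem.Dict.empty
  let ex := gets.toList.foldl (fun d c => d.insert c true) ex0
  -- 'exists[exist]' in the loop over the keys always finds its key, so getD is exact here
  ex.keys.foldl (fun result k => if ex.getD k false = false then result + (k.toNat : Int) else result) 0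

-- ===== PORT B =====
def compute_alt (gets : String) : Int :=
  2015 - (PySem.Set.ofList
    ((gets.toList.filter (fun c => decide ('A' ≤ c) && decide (c ≤ 'Z'))).map
      (fun c => (c.toNat : Int)))).sum

-- ===== PRECONDITION & SPEC =====
def Spec_compute (gets : String) (out : Int) : Prop := out = compute_alt gets
instance (gets : String) (out : Int) : Decidable (Spec_compute gets out) := by unfold Spec_compute; infer_instance

-- ===== CLAIM (what is proved, stated in full; the proofs are below) =====
def Claim_equal_compute : Prop := ∀ (gets : String), Dom_compute gets → Spec_compute gets (compute gets)

-- ===== LEMMAS AND PROOFS =====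

-- looking up after the 'for get in gets: exists[get] = True' loop
theorem pv_get_trueFold : ∀ (l : List Char) (d : PySem.Dict Char Bool) (c : Char),
    (l.foldl (fun d c => d.insert c true) d).get? c = if c ∈ l then some true else d.get? c := by
  intro l
  induction l with
  | nil => intro d c; simp
  | cons a t ih =>
    intro d c
    simp only [List.foldl_cons, ih, PySem.Dict.get?_insert]
    by_cases hc : c ∈ t <;> by_cases hca : c = a <;> simp [hc, hca]

-- looking up in the initial { chr(i): False } dict
theorem pv_get_baseFold : ∀ (R : List Int) (d : PySem.Dict Char Bool) (c : Char),
    (R.foldl (fun d i => d.insert (Char.ofNat i.toNat) false) d).get? c =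
      if ∃ i ∈ R, Char.ofNat i.toNat = c then some false else d.get? c := by
  intro R
  induction R with
  | nil => intro d c; simp
  | cons a t ih =>
    intro d c
    simp only [List.foldl_cons, ih, PySem.Dict.get?_insert]
    by_cases ht : ∃ i ∈ t, Char.ofNat i.toNat = c <;> by_cases hca : c = Char.ofNat a.toNat <;>
      simp [ht, hca] <;> tauto

-- key order after the 'for get in gets' loop: old keys, then new chars in first-occurrence order
theorem pv_keys_trueFold : ∀ (l : List Char) (d : PySem.Dict Char Bool),
    (l.foldl (fun d c => d.insert c true) d).keys = PySem.Set.update d.keys l := by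
  intro l
  induction l with
  | nil => intro d; simp [PySem.Set.update]
  | cons a t ih =>
    intro d
    simp only [List.foldl_cons, ih, PySem.Set.update_cons]
    congr 1
    by_cases h : d.contains a
    · rw [PySem.Dict.keys_insert_of_contains _ _ h, PySem.Set.add_eq_ite,
        if_pos ((PySem.Dict.contains_iff_mem_keys _ _).1 h)]
    · rw [PySem.Dict.keys_insert_of_not_contains _ _ (by simpa using h), PySem.Set.add_eq_ite,
        if_neg (fun hm => h ((PySem.Dict.contains_iff_mem_keys _ _).2 hm))]

theorem pv_upper_iff (c : Char) : ('A' ≤ c ∧ c ≤ 'Z') ↔ (65 ≤ c.toNat ∧ c.toNat ≤ 90) := by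
  simp only [Char.le_def, UInt32.le_iff_toNat_le]
  exact Iff.rfl

theorem pv_toNat_ofNat (m : Nat) (h : m < 55296) : (Char.ofNat m).toNat = m := by
  rw [Char.toNat_ofNat, if_pos (Or.inl h)]

theorem pv_sum_split (R : List Int) (P : Int → Prop) [DecidablePred P] :
    (R.map (fun i => if P i then 0 else i)).sum
      = R.sum - (R.filter (fun i => decide (P i))).sum := by
  induction R with
  | nil => simp
  | cons a t ih =>
    by_cases h : P a <;> simp [h, ih] <;> ring

-- ===== VERDICT (by name: the statement is the Claim_ definition above) =====
theorem compute_spec : Claim_equal_compute := by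
  intro gets _
  unfold Spec_compute compute compute_alt
  simp only []
  set l := gets.toList with hl
  set R := PySem.List.pyRange 65 91 1 with hR
  set ex0 : PySem.Dict Char Bool :=
    R.foldl (fun d i => d.insert (Char.ofNat i.toNat) false) PySem.Dict.empty with hex0
  set ex := l.foldl (fun d c => d.insert c true) ex0 with hex
  -- the value stored at any key k of ex, read with default false, is 'k ∈ l'
  have hval : ∀ k : Char, ex.getD k false = decide (k ∈ l) := by
    intro k
    rw [PySem.Dict.getD_eq_get?_getD, hex, pv_get_trueFold, hex0, pv_get_baseFold]
    by_cases hk : k ∈ l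
    · simp [hk]
    · by_cases hb : ∃ i ∈ R, Char.ofNat i.toNat = k <;> simp [hk, hb]
  -- the keys of ex: the 26 letters, then the other distinct chars of l in order
  have hkeys : ex.keys = ex0.keys ++ (PySem.Set.ofList l).filter (fun y => !(PySem.Set.contains ex0.keys y)) := by
    rw [hex, pv_keys_trueFold, PySem.Set.update_eq_append_filter]
  have hK : ex0.keys = R.map (fun i => Char.ofNat i.toNat) := by decide
  rw [hkeys, List.foldl_append]
  -- the trailing (non-letter) keys are all in l, so they contribute nothing
  have htail : ∀ x ∈ (PySem.Set.ofList l).filter (fun y => !(PySem.Set.contains ex0.keys y)),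
      ∀ acc : Int, (if ex.getD x false = false then acc + (x.toNat : Int) else acc) = acc := by
    intro x hx acc
    have hxl : x ∈ l := by
      have := (List.mem_filter.1 hx).1
      exact (PySem.Set.mem_ofList l x).1 this
    rw [hval, if_neg (by simp [hxl])]
  rw [PySem.List.foldl_congr_mem' _ _ (fun acc _ => acc) _ htail, PySem.List.foldl_ignore]
  -- the first 26 keys: sum of i over absent letters
  rw [hK, List.foldl_map]
  have hstep : ∀ i ∈ R, ∀ acc : Int,
      (if ex.getD (Char.ofNat i.toNat) false = false then acc + ((Char.ofNat i.toNat).toNat : Int) else acc)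
        = acc + (if Char.ofNat i.toNat ∈ l then 0 else i) := by
    intro i hi acc
    have hib : 65 ≤ i ∧ i < 91 := (PySem.List.mem_pyRange_one).1 hi
    have hn : (Char.ofNat i.toNat).toNat = i.toNat := pv_toNat_ofNat i.toNat (by omega)
    rw [hval]
    by_cases hm : Char.ofNat i.toNat ∈ l
    · simp [hm]
    · simp [hm, hn]; omega
  rw [PySem.List.foldl_congr_mem' _ _ _ _ hstep, PySem.List.foldl_add, zero_add,
    pv_sum_split R (fun i => Char.ofNat i.toNat ∈ l)]
  have hRsum : R.sum = 2015 := by decide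
  rw [hRsum]
  -- the present-letter sums agree (same distinct elements, both duplicate-free)
  have hperm : (PySem.Set.ofList
      ((l.filter (fun c => decide ('A' ≤ c) && decide (c ≤ 'Z'))).map (fun c => (c.toNat : Int)))).Perm
      (R.filter (fun i => decide (Char.ofNat i.toNat ∈ l))) := by
    refine (List.perm_ext_iff_of_nodup (PySem.Set.nodup_ofList _) ((PySem.List.nodup_pyRange_one 65 91).filter _)).2 ?_
    intro a
    rw [PySem.Set.mem_ofList, List.mem_filter]
    constructor
    · intro ha
      obtain ⟨c, hc, rfl⟩ := List.mem_map.1 ha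
      obtain ⟨hcl, hcu⟩ := List.mem_filter.1 hc
      have hu : 65 ≤ c.toNat ∧ c.toNat ≤ 90 := (pv_upper_iff c).1 (by simpa using hcu)
      have hcn : ((c.toNat : Int)).toNat = c.toNat := by omega
      refine ⟨(PySem.List.mem_pyRange_one).2 (by omega), ?_⟩
      simp only [hcn, Char.ofNat_toNat]
      simpa using hcl
    · rintro ⟨haR, haL⟩
      have hib : 65 ≤ a ∧ a < 91 := (PySem.List.mem_pyRange_one).1 haR
      have haL' : Char.ofNat a.toNat ∈ l := by simpa using haL
      refine List.mem_map.2 ⟨Char.ofNat a.toNat, List.mem_filter.2 ⟨haL', ?_⟩, ?_⟩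
      · have hn : (Char.ofNat a.toNat).toNat = a.toNat := pv_toNat_ofNat a.toNat (by omega)
        simp only [Bool.and_eq_true, decide_eq_true_eq]
        exact (pv_upper_iff _).2 ⟨by omega, by omega⟩
      · have hn : (Char.ofNat a.toNat).toNat = a.toNat := pv_toNat_ofNat a.toNat (by omega)
        rw [hn]; omega
  rw [hperm.sum_eq]
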